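-- pv_equiv track=rewrite | github.com/asdzxc1a/oracle-huasheng | kernel/formatters.py | generate_uncertainty_map
-- ===== SOURCE A (Python) =====
-- from typing import Any
--
-- def generate_uncertainty_map(actor: str, videos: list[dict[str, Any]], focus: str = "") -> str:
--     lines = [
--         "The following gaps limit confidence in this analysis:",
--         "",
--     ]
--
--     lines.append(
--         f"**Unknown #1 — Private Stress Response (Tier C implication)**\n\n"
--         f"We observe {actor} in professional and semi-professional contexts. "
--         f"We do not observe them under genuine personal crisis. Crisis performance "
--         f"requires different emotional resources than professional stress management. "
--         f"Roles requiring sustained emotional breakdown may be harder than roles "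
--         f"requiring controlled professional stress."
--     )
--     lines.append("")
--
--     lines.append(
--         f"**Unknown #2 — Long-Term Collaboration Dynamics (Tier C implication)**\n\n"
--         f"All available footage is episodic (interviews, festivals). We have no "
--         f"longitudinal footage of {actor} in a months-long creative collaboration. "
--         f"Some actors excel in short bursts but degrade over time; others deepen. "
--         f"We cannot determine which pattern applies without longitudinal data."
--     )
--     lines.append("")
--
--     lines.append(
--         f"**Unknown #3 — Physical Transformation Capacity (Tier C implication)**\n\n"
--         f"The current analysis is based on {actor}'s established physical type and "
--         f"movement patterns. We have limited data on their willingness and ability "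
--         f"to fundamentally alter physicality for a role (weight change, movement "
--         f"training, posture overhaul). This is a significant unknown for roles "
--         f"requiring physical transformation."
--     )
--     lines.append("")
--
--     has_podcast = any(v.get("source_type") == "podcast" for v in videos)
--     has_festival = any(v.get("source_type") in ("festival_qa", "press_conference") for v in videos)
--     has_bts = any(v.get("source_type") == "bts" for v in videos)
--
--     gaps = []
--     if not has_podcast:
--         gaps.append("No long-form podcast footage available")
--     if not has_festival:
--         gaps.append("No festival Q&A footage cataloged")
--     if not has_bts:
--         gaps.append("No behind-the-scenes footage available")
--
--     if gaps:
--         lines.append(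
--             f"**Unknown #4 — Source Coverage Gaps (Tier C implication)**\n\n"
--             + "\n".join(f"- {g}" for g in gaps)
--             + "\n\nThese gaps limit confidence in attachment-style and baseline-stress assessments."
--         )
--     else:
--         lines.append(
--             f"**Unknown #4 — Validation Gap (Tier C implication)**\n\n"
--             f"No independent verification of source authenticity has been performed. "
--             f"Fan-edited clips may be mislabeled as RAW. Official BTS may be staged. "
--             f"Without source authentication, all access-level assignments are provisional."
--         )
--
--     lines.append("")
--     lines.append("---")
--     lines.append("")
--     lines.append(
--         "> **Huasheng Principle:** Transparency is a feature, not a bug. "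
--         "What you don't know is as important as what you do."
--     )
--
--     return "\n".join(lines)
-- ===== SOURCE B (Python) =====
-- # B: single-pass bitmask coverage accumulator + table lookup, instead of three any() scans.
-- _TYPE_BITS = {"podcast": 1, "festival_qa": 2, "press_conference": 2, "bts": 4}
--
-- _GAP_TABLE = [
--     (1, "No long-form podcast footage available"),
--     (2, "No festival Q&A footage cataloged"),
--     (4, "No behind-the-scenes footage available"),
-- ]
--
--
-- def generate_uncertainty_map(actor, videos, focus=""):
--     # One pass over videos: OR together the coverage bit of each video's source_type.
--     mask = 0
--     for v in videos:
--         mask |= _TYPE_BITS.get(v.get("source_type"), 0)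
--
--     # A gap is reported for every coverage bit NOT present in the mask.
--     gaps = [msg for bit, msg in _GAP_TABLE if not mask & bit]
--
--     if gaps:
--         unknown4 = (
--             "**Unknown #4 — Source Coverage Gaps (Tier C implication)**\n\n"
--             + "\n".join(f"- {g}" for g in gaps)
--             + "\n\nThese gaps limit confidence in attachment-style and baseline-stress assessments."
--         )
--     else:
--         unknown4 = (
--             "**Unknown #4 — Validation Gap (Tier C implication)**\n\n"
--             "No independent verification of source authenticity has been performed. "
--             "Fan-edited clips may be mislabeled as RAW. Official BTS may be staged. "
--             "Without source authentication, all access-level assignments are provisional."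
--         )
--
--     return "\n".join([
--         "The following gaps limit confidence in this analysis:",
--         "",
--         f"**Unknown #1 — Private Stress Response (Tier C implication)**\n\n"
--         f"We observe {actor} in professional and semi-professional contexts. "
--         f"We do not observe them under genuine personal crisis. Crisis performance "
--         f"requires different emotional resources than professional stress management. "
--         f"Roles requiring sustained emotional breakdown may be harder than roles "
--         f"requiring controlled professional stress.",
--         "",
--         f"**Unknown #2 — Long-Term Collaboration Dynamics (Tier C implication)**\n\n"
--         f"All available footage is episodic (interviews, festivals). We have no "
--         f"longitudinal footage of {actor} in a months-long creative collaboration. "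
--         f"Some actors excel in short bursts but degrade over time; others deepen. "
--         f"We cannot determine which pattern applies without longitudinal data.",
--         "",
--         f"**Unknown #3 — Physical Transformation Capacity (Tier C implication)**\n\n"
--         f"The current analysis is based on {actor}'s established physical type and "
--         f"movement patterns. We have limited data on their willingness and ability "
--         f"to fundamentally alter physicality for a role (weight change, movement "
--         f"training, posture overhaul). This is a significant unknown for roles "
--         f"requiring physical transformation.",
--         "",
--         unknown4,
--         "",
--         "---",
--         "",
--         "> **Huasheng Principle:** Transparency is a feature, not a bug. "
--         "What you don't know is as important as what you do.",
--     ])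
-- ===== Notes on version B (the rewrite author's own statement) =====
-- stated objective: alternative
-- what changed: B replaces A's three independent any() scans and sequential gap appends by a single fold over videos that ORs per-source-type coverage bits (from a type->bit table) into one integer mask, then derives the gaps list by filtering a bit->message table against the mask, and emits the report as one literal list join instead of incremental appends.
import Mathlib
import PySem

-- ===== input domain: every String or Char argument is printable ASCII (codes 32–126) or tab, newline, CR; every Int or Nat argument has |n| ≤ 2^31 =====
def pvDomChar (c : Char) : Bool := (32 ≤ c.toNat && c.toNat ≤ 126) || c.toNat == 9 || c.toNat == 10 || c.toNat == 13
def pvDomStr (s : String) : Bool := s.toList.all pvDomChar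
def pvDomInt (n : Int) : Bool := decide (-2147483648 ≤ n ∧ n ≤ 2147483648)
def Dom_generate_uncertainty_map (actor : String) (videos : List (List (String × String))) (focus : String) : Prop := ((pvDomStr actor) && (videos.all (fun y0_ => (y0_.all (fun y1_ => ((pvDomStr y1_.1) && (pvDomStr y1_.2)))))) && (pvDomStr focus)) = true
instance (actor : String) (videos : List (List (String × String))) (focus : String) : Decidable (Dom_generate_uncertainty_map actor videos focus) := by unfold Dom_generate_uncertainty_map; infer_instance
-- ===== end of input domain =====

-- B replaces A's three independent any()-scans and sequential gap appends by one fold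
-- over the videos ORing per-source-type coverage bits into a single mask, then filters
-- a bit->message table against the mask (objective: alternative).

-- Shared string constants (verbatim from the Python source; used by both ports)
def pvHeaderLine : String := "The following gaps limit confidence in this analysis:"

def pvUnknown1 (actor : String) : String :=
  "**Unknown #1 — Private Stress Response (Tier C implication)**\n\nWe observe " ++ actor ++
  " in professional and semi-professional contexts. We do not observe them under genuine personal crisis. Crisis performance requires different emotional resources than professional stress management. Roles requiring sustained emotional breakdown may be harder than roles requiring controlled professional stress."

def pvUnknown2 (actor : String) : String :=
  "**Unknown #2 — Long-Term Collaboration Dynamics (Tier C implication)**\n\nAll available footage is episodic (interviews, festivals). We have no longitudinal footage of " ++ actor ++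
  " in a months-long creative collaboration. Some actors excel in short bursts but degrade over time; others deepen. We cannot determine which pattern applies without longitudinal data."

def pvUnknown3 (actor : String) : String :=
  "**Unknown #3 — Physical Transformation Capacity (Tier C implication)**\n\nThe current analysis is based on " ++ actor ++
  "'s established physical type and movement patterns. We have limited data on their willingness and ability to fundamentally alter physicality for a role (weight change, movement training, posture overhaul). This is a significant unknown for roles requiring physical transformation."

def pvGapPodcast : String := "No long-form podcast footage available"
def pvGapFestival : String := "No festival Q&A footage cataloged"
def pvGapBts : String := "No behind-the-scenes footage available"

def pvUnknown4Gaps (gaps : List String) : String :=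
  "**Unknown #4 — Source Coverage Gaps (Tier C implication)**\n\n" ++
  PySem.Str.join "\n" (gaps.map (fun g => "- " ++ g)) ++
  "\n\nThese gaps limit confidence in attachment-style and baseline-stress assessments."

def pvUnknown4Validation : String :=
  "**Unknown #4 — Validation Gap (Tier C implication)**\n\nNo independent verification of source authenticity has been performed. Fan-edited clips may be mislabeled as RAW. Official BTS may be staged. Without source authentication, all access-level assignments are provisional."

def pvPrinciple : String :=
  "> **Huasheng Principle:** Transparency is a feature, not a bug. What you don't know is as important as what you do."

-- ===== PORT A =====
def generate_uncertainty_map (actor : String) (videos : List (List (String × String))) (focus : String) : String :=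
  let lines : List String := [pvHeaderLine, ""]
  let lines := lines ++ [pvUnknown1 actor]
  let lines := lines ++ [""]
  let lines := lines ++ [pvUnknown2 actor]
  let lines := lines ++ [""]
  let lines := lines ++ [pvUnknown3 actor]
  let lines := lines ++ [""]
  let has_podcast := videos.any (fun v => (PySem.Dict.ofList v).get? "source_type" == some "podcast")
  let has_festival := videos.any (fun v =>
    [some "festival_qa", some "press_conference"].contains ((PySem.Dict.ofList v).get? "source_type"))
  let has_bts := videos.any (fun v => (PySem.Dict.ofList v).get? "source_type" == some "bts")
  let gaps : List String := []
  let gaps := if !has_podcast then gaps ++ [pvGapPodcast] else gaps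
  let gaps := if !has_festival then gaps ++ [pvGapFestival] else gaps
  let gaps := if !has_bts then gaps ++ [pvGapBts] else gaps
  let lines := if !gaps.isEmpty then lines ++ [pvUnknown4Gaps gaps] else lines ++ [pvUnknown4Validation]
  let lines := lines ++ [""]
  let lines := lines ++ ["---"]
  let lines := lines ++ [""]
  let lines := lines ++ [pvPrinciple]
  PySem.Str.join "\n" lines

-- ===== PORT B =====
-- _TYPE_BITS (str-keyed dict; a None source_type misses the dict and yields the default 0)
def pvTypeBits : PySem.Dict String Nat :=
  PySem.Dict.ofList [("podcast", 1), ("festival_qa", 2), ("press_conference", 2), ("bts", 4)]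

-- _TYPE_BITS.get(v.get("source_type"), 0)
def pvBitsOf (t : Option String) : Nat :=
  match t with
  | none => 0
  | some s => pvTypeBits.getD s 0

-- _GAP_TABLE
def pvGapTable : List (Nat × String) :=
  [(1, pvGapPodcast), (2, pvGapFestival), (4, pvGapBts)]

def generate_uncertainty_map_alt (actor : String) (videos : List (List (String × String))) (focus : String) : String :=
  let mask : Nat := videos.foldl (fun m v => m ||| pvBitsOf ((PySem.Dict.ofList v).get? "source_type")) 0
  let gaps : List String := (pvGapTable.filter (fun p => mask &&& p.1 == 0)).map (fun p => p.2)
  let unknown4 := if !gaps.isEmpty then pvUnknown4Gaps gaps else pvUnknown4Validation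
  PySem.Str.join "\n"
    [pvHeaderLine, "", pvUnknown1 actor, "", pvUnknown2 actor, "", pvUnknown3 actor, "",
      unknown4, "", "---", "", pvPrinciple]

-- ===== PRECONDITION & SPEC =====
def Spec_generate_uncertainty_map (actor : String) (videos : List (List (String × String))) (focus : String) (out : String) : Prop := out = generate_uncertainty_map_alt actor videos focus
instance (actor : String) (videos : List (List (String × String))) (focus : String) (out : String) : Decidable (Spec_generate_uncertainty_map actor videos focus out) := by unfold Spec_generate_uncertainty_map; infer_instance

-- ===== CLAIM (what is proved, stated in full; the proofs are below) =====
def Claim_equal_generate_uncertainty_map : Prop := ∀ (actor : String) (videos : List (List (String × String))) (focus : String), Dom_generate_uncertainty_map actor videos focus → Spec_generate_uncertainty_map actor videos focus (generate_uncertainty_map actor videos focus)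

-- ===== LEMMAS AND PROOFS =====

-- A bit of the OR-fold is set iff some video's bits have that bit set.
theorem pv_testBit_foldl_or (l : List (List (String × String)))
    (f : List (String × String) → Nat) (k : Nat) (init : Nat) :
    (l.foldl (fun m v => m ||| f v) init).testBit k
      = (init.testBit k || l.any (fun v => (f v).testBit k)) := by
  induction l generalizing init with
  | nil => simp
  | cons v tl ih => simp [List.foldl_cons, ih, Nat.testBit_or, Bool.or_assoc]

-- mask & 2^k == 0 is the negation of bit k of the mask.
theorem pv_and_pow_eq_zero (n k : Nat) : (n &&& 2 ^ k == 0) = !n.testBit k := by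
  rw [Nat.and_two_pow n k]
  cases h : n.testBit k <;> simp

-- pvTypeBits as a literal dict (its four keys are distinct).
theorem pv_typeBits_mk :
    pvTypeBits = PySem.Dict.mk [("podcast", 1), ("festival_qa", 2), ("press_conference", 2), ("bts", 4)] := by
  decide

-- The coverage bits of a source_type value, as a case split on the four table keys.
theorem pv_bitsOf_eq (t : Option String) :
    pvBitsOf t = if t == some "podcast" then 1 else if t == some "festival_qa" then 2
      else if t == some "press_conference" then 2 else if t == some "bts" then 4 else 0 := by
  cases t with
  | none => simp [pvBitsOf]
  | some s =>
    by_cases h1 : s = "podcast"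
    · subst h1; decide
    by_cases h2 : s = "festival_qa"
    · subst h2; decide
    by_cases h3 : s = "press_conference"
    · subst h3; decide
    by_cases h4 : s = "bts"
    · subst h4; decide
    · simp [pvBitsOf, pv_typeBits_mk, PySem.Dict.getD_eq_get?_getD, PySem.Dict.get?,
        Ne.symm h1, Ne.symm h2, Ne.symm h3, Ne.symm h4, h1, h2, h3, h4]

-- Bit 0 of a video's coverage bits says "podcast".
theorem pv_bitsOf_testBit_zero (t : Option String) :
    (pvBitsOf t).testBit 0 = (t == some "podcast") := by
  rw [pv_bitsOf_eq]; split_ifs with h1 h2 h3 h4 <;> simp_all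

-- Bit 1 says "festival_qa or press_conference".
theorem pv_bitsOf_testBit_one (t : Option String) :
    (pvBitsOf t).testBit 1 = (t == some "festival_qa" || t == some "press_conference") := by
  rw [pv_bitsOf_eq]; split_ifs with h1 h2 h3 h4 <;> simp_all <;> decide

-- Bit 2 says "bts".
theorem pv_bitsOf_testBit_two (t : Option String) :
    (pvBitsOf t).testBit 2 = (t == some "bts") := by
  rw [pv_bitsOf_eq]; split_ifs with h1 h2 h3 h4 <;> simp_all <;> decide

-- A's pair-membership any() equals the disjunction of the two single-value any()s.
theorem pv_festival_any (videos : List (List (String × String))) :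
    videos.any (fun v => ((PySem.Dict.ofList v).get? "source_type" == some "festival_qa"
        || (PySem.Dict.ofList v).get? "source_type" == some "press_conference"))
      = videos.any (fun v =>
          [some "festival_qa", some "press_conference"].contains ((PySem.Dict.ofList v).get? "source_type")) := by
  refine List.any_congr rfl (fun v => ?_)
  rw [Bool.eq_iff_iff]
  simp

-- ===== VERDICT (by name: the statement is the Claim_ definition above) =====
theorem generate_uncertainty_map_spec : Claim_equal_generate_uncertainty_map := by
  intro actor videos focus _
  unfold Spec_generate_uncertainty_map generate_uncertainty_map generate_uncertainty_map_alt
  have hb : ∀ (bit k : Nat), bit = 2 ^ k →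
      ((videos.foldl (fun m v => m ||| pvBitsOf ((PySem.Dict.ofList v).get? "source_type")) 0) &&& bit == 0)
      = !videos.any (fun v => (pvBitsOf ((PySem.Dict.ofList v).get? "source_type")).testBit k) := by
    intro bit k h
    subst h
    rw [pv_and_pow_eq_zero, pv_testBit_foldl_or]
    simp
  have h1 := hb 1 0 (by norm_num)
  have h2 := hb 2 1 (by norm_num)
  have h4 := hb 4 2 (by norm_num)
  simp only [pv_bitsOf_testBit_zero] at h1
  simp only [pv_bitsOf_testBit_one] at h2
  simp only [pv_bitsOf_testBit_two] at h4
  rw [pv_festival_any] at h2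
  simp only [pvGapTable, List.filter_cons, List.filter_nil, h1, h2, h4]
  generalize videos.any (fun v => (PySem.Dict.ofList v).get? "source_type" == some "podcast") = hp
  generalize videos.any (fun v =>
    [some "festival_qa", some "press_conference"].contains ((PySem.Dict.ofList v).get? "source_type")) = hf
  generalize videos.any (fun v => (PySem.Dict.ofList v).get? "source_type" == some "bts") = hbts
  cases hp <;> cases hf <;> cases hbts <;> rfl
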